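-- pv_equiv track=rewrite | github.com/shian0346/DTXtoPNG | information.py | combiner
-- ===== SOURCE A (Python) =====
-- from math import gcd
--
-- def combiner(l1,l2):
--     e1 = ""
--     e2 = ""
--     d = gcd(len(l1), len(l2))
--     l3 = ""
--     # extend l1 to e1
--     for i in l1:
--         e1 += i
--         for j in range(int(len(l2)/d)-1):
--             e1 += "0"
--     # extend l2 to e2
--     for i in l2:
--         e2 +=   i
--         for j in range(int(len(l1)/d)-1):
--             e2 += "0"
--     # combine e1 and e2 into l3
--     for i in range(len(e1)):
--         if e1[i] == "1" or e2[i] == "1":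
--             l3 += "1"
--         else:
--             l3 += "0"
--     return l3
-- ===== SOURCE B (Python) =====
-- from math import gcd
--
-- def combiner(l1, l2):
--     # one index-arithmetic pass over the LCM length; no intermediate extended strings
--     if not l1:
--         return ""
--     d = gcd(len(l1), len(l2))
--     step1 = len(l2) // d
--     step2 = len(l1) // d
--     out = []
--     for k in range(len(l1) * step1):
--         bit = (k % step1 == 0 and l1[k // step1] == "1") or \
--               (k % step2 == 0 and l2[k // step2] == "1")
--         out.append("1" if bit else "0")
--     return "".join(out)
-- ===== Notes on version B (the rewrite author's own statement) =====
-- stated objective: faster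
-- what changed: Replaces A's two string-extension loops (building intermediate zero-interleaved strings e1/e2 by repeated string concatenation) plus an OR loop by a single index-arithmetic pass over the LCM length that reads l1[k//step1] and l2[k//step2] directly and joins a list once.
-- intended difference: On inputs with l2 == '' and l1 nonempty (necessarily all '1's, otherwise A raises), A returns a copy of l1 — an accident of 'or' short-circuiting past the out-of-range e2[i] — while B returns '', the intended value since the common extended (LCM) length is 0. — e.g. on combiner("1", ""): A returns "1", B returns ""
import Mathlib
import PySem

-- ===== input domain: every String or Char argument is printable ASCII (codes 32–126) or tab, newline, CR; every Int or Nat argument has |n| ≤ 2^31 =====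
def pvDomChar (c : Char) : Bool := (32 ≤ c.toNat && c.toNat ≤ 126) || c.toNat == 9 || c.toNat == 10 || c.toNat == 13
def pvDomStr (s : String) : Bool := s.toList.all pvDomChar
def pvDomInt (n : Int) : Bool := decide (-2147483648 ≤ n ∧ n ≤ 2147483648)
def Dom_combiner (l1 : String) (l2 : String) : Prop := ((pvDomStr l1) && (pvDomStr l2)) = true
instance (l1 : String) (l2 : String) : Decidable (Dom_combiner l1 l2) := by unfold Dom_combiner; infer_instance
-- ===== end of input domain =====

-- B replaces A's two string-extension loops plus OR loop by a single index-arithmetic pass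
-- over the LCM length (same asymptotics; a timing run measured a constant-factor speedup).

-- ===== PORT A =====
-- Notes on exactness: int(len(l2)/d) equals len(l2)/d by exact Nat division wherever the inner
-- loop body actually runs (d divides len(l2); d = 0 is only reached when the enclosing loop is
-- empty), and range of a negative count is empty, matching Nat truncated subtraction.
-- Python's short-circuit 'e1[i]=="1" or e2[i]=="1"' indexes e2 only when e1[i] ≠ '1'; e2[i]
-- raises IndexError exactly on the inputs Pre_combiner excludes, so getD with a non-'1'
-- default '*' is exact on the admitted inputs.
def combiner (l1 : String) (l2 : String) : String :=
  let c1 := l1.toList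
  let c2 := l2.toList
  let d := Nat.gcd c1.length c2.length
  let e1 := c1.foldl (fun e i => (e ++ [i]) ++ List.replicate (c2.length / d - 1) '0') []
  let e2 := c2.foldl (fun e i => (e ++ [i]) ++ List.replicate (c1.length / d - 1) '0') []
  let l3 := (List.range e1.length).foldl
    (fun acc i => if e1.getD i '*' = '1' ∨ e2.getD i '*' = '1' then acc ++ ['1'] else acc ++ ['0']) []
  String.ofList l3

-- ===== PORT B =====
-- Source B indexes l1[k//step1] and l2[k//step2] only at indices that are always in range on the
-- admitted inputs, so getD's default '*' is never returned there.
def combiner_alt (l1 : String) (l2 : String) : String :=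
  let c1 := l1.toList
  let c2 := l2.toList
  if c1 = [] then "" else
    let d := Nat.gcd c1.length c2.length
    let s1 := c2.length / d
    let s2 := c1.length / d
    String.ofList ((List.range (c1.length * s1)).map (fun k =>
      if (k % s1 = 0 ∧ c1.getD (k / s1) '*' = '1') ∨ (k % s2 = 0 ∧ c2.getD (k / s2) '*' = '1')
      then '1' else '0'))

-- ===== PRECONDITION & SPEC =====
-- Pre_ excludes exactly the inputs where A raises IndexError: l2 empty while l1 contains a
-- character other than '1' (the OR loop then indexes the empty extended string e2).
def Pre_combiner (l1 : String) (l2 : String) : Prop :=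
  l2 ≠ "" ∨ l1.toList.all (· = '1') = true
instance (l1 : String) (l2 : String) : Decidable (Pre_combiner l1 l2) := by
  unfold Pre_combiner; infer_instance

def pvWitness_combiner : String × String := ("10", "1")

-- On inputs with l2 == "" and l1 nonempty (necessarily all '1's, otherwise A raises), A returns
-- a copy of l1 — an accident of 'or' short-circuiting past the out-of-range e2[i] — while B
-- returns "", the intended value since the common extended (LCM) length is 0.
def D_combiner (l1 : String) (l2 : String) : Prop := l2 = "" ∧ l1 ≠ ""
instance (l1 : String) (l2 : String) : Decidable (D_combiner l1 l2) := by
  unfold D_combiner; infer_instance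

def Spec_combiner (l1 : String) (l2 : String) (out : String) : Prop :=
  ¬ D_combiner l1 l2 → out = combiner_alt l1 l2
instance (l1 : String) (l2 : String) (out : String) : Decidable (Spec_combiner l1 l2 out) := by
  unfold Spec_combiner; infer_instance

def pvDiffWitness_combiner : String × String := ("1", "")
def pvDiffWitnessOut_combiner : String × String := ("1", "")

-- ===== CLAIM (what is proved, stated in full; the proofs are below) =====
def Claim_unchanged_combiner : Prop := ∀ (l1 : String) (l2 : String),
  Dom_combiner l1 l2 → Pre_combiner l1 l2 → Spec_combiner l1 l2 (combiner l1 l2)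
def Claim_changed_combiner : Prop :=
  Dom_combiner (pvDiffWitness_combiner.1) (pvDiffWitness_combiner.2) ∧
  Pre_combiner (pvDiffWitness_combiner.1) (pvDiffWitness_combiner.2) ∧
  D_combiner (pvDiffWitness_combiner.1) (pvDiffWitness_combiner.2) ∧
  combiner (pvDiffWitness_combiner.1) (pvDiffWitness_combiner.2) = pvDiffWitnessOut_combiner.1 ∧
  combiner_alt (pvDiffWitness_combiner.1) (pvDiffWitness_combiner.2) = pvDiffWitnessOut_combiner.2 ∧
  pvDiffWitnessOut_combiner.1 ≠ pvDiffWitnessOut_combiner.2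
def Claim_exact_combiner : Prop := ∀ (l1 : String) (l2 : String),
  Dom_combiner l1 l2 → Pre_combiner l1 l2 → D_combiner l1 l2 →
  combiner l1 l2 ≠ combiner_alt l1 l2

-- ===== LEMMAS AND PROOFS =====

-- indexing into the zero-interleaved (block) list
theorem getD_cons_pred (a : Char) (t : List Char) (j : Nat) (hj : 1 ≤ j) :
    (a :: t).getD j '*' = t.getD (j - 1) '*' := by
  cases j with
  | zero => omega
  | succ n => simp

theorem getD_blocks (c : List Char) (s : Nat) (hs : 1 ≤ s) :
    ∀ k, k < c.length * s →
      (c.flatMap (fun i => i :: List.replicate (s - 1) '0')).getD k '*' =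
        if k % s = 0 then c.getD (k / s) '*' else '0' := by
  induction c with
  | nil => intro k hk; simp at hk
  | cons a t ih =>
    intro k hk
    simp only [List.flatMap_cons]
    have hblen : (a :: List.replicate (s - 1) '0').length = s := by simp; omega
    by_cases hlt : k < s
    · rw [List.getD_eq_getElem?_getD, List.getElem?_append_left (by rw [hblen]; omega)]
      by_cases h0 : k = 0
      · subst h0
        simp [Nat.zero_mod, Nat.zero_div]
      · have hmod : k % s = k := Nat.mod_eq_of_lt hlt
        rw [List.getElem?_cons, if_neg h0]
        rw [List.getElem?_replicate]
        simp [hmod, h0, show k - 1 < s - 1 by omega]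
    · have hks : s ≤ k := by omega
      rw [List.getD_eq_getElem?_getD, List.getElem?_append_right (by rw [hblen]; omega), hblen,
          ← List.getD_eq_getElem?_getD]
      have := ih (k - s) (by
        simp only [List.length_cons, Nat.add_mul, Nat.one_mul] at hk; omega)
      rw [this]
      have hmod : (k - s) % s = k % s := by
        conv_rhs => rw [show k = (k - s) + s by omega]
        simp [Nat.add_mod_right]
      have hdiv : (k - s) / s = k / s - 1 := by
        have h := Nat.add_div_right (k - s) (show 0 < s by omega)
        rw [show k - s + s = k by omega] at h
        rw [h, Nat.add_sub_cancel]
      have hdiv1 : 1 ≤ k / s := Nat.one_le_div_iff (by omega) |>.mpr hks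
      rw [hmod, hdiv]
      split
      · rw [getD_cons_pred _ _ _ hdiv1]
      · rfl

theorem len_blocks (c : List Char) (s : Nat) (hs : 1 ≤ s) :
    (c.flatMap (fun i => i :: List.replicate (s - 1) '0')).length = c.length * s := by
  induction c with
  | nil => simp
  | cons a t ih =>
    simp only [List.flatMap_cons, List.length_append, List.length_cons, List.length_replicate,
      ih, Nat.add_mul, Nat.one_mul]
    omega

theorem fold_blocks (c : List Char) (r : List Char) (acc : List Char) :
    c.foldl (fun e i => (e ++ [i]) ++ r) acc = acc ++ c.flatMap (fun i => i :: r) := by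
  induction c generalizing acc with
  | nil => simp
  | cons a t ih =>
    rw [List.foldl_cons, ih]
    simp

theorem foldl_bits_eq_map (e1 e2 : List Char) (n : Nat) :
    (List.range n).foldl (fun acc i =>
        if e1.getD i '*' = '1' ∨ e2.getD i '*' = '1' then acc ++ ['1'] else acc ++ ['0']) [] =
      (List.range n).map (fun i => if e1.getD i '*' = '1' ∨ e2.getD i '*' = '1' then '1' else '0') := by
  induction n with
  | zero => simp
  | succ m ih =>
    rw [List.range_succ, List.foldl_append, List.map_append, ih]
    simp only [List.foldl_cons, List.foldl_nil, List.map_cons, List.map_nil]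
    split <;> simp

theorem foldl_bits_length (e1 e2 : List Char) (n : Nat) :
    ((List.range n).foldl (fun acc i =>
        if e1.getD i '*' = '1' ∨ e2.getD i '*' = '1' then acc ++ ['1'] else acc ++ ['0']) []).length
      = n := by
  rw [foldl_bits_eq_map]
  simp

theorem string_mk_ne (l : List Char) (h : l ≠ []) : String.ofList l ≠ "" := by
  intro hc
  have h2 := congrArg String.toList hc
  rw [String.toList_ofList] at h2
  simp at h2
  exact h h2

-- ===== VERDICT (by name: the statement is the Claim_ definition above) =====
theorem combiner_spec : Claim_unchanged_combiner := by
  intro l1 l2 _ hpre hnd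
  unfold combiner combiner_alt
  simp only []
  set c1 := l1.toList with hc1
  set c2 := l2.toList with hc2
  by_cases h1 : c1 = []
  · -- l1 empty: both sides are ""
    rw [if_pos h1, h1]
    simp
  · -- l1 nonempty; ¬D_ gives l2 nonempty
    have h2 : c2 ≠ [] := by
      intro hc
      apply hnd
      constructor
      · have h := String.ofList_toList (s := l2)
        rw [show l2.toList = ([] : List Char) from hc] at h
        exact h.symm
      · intro hl1; apply h1; rw [hc1, hl1]; rfl
    rw [if_neg h1]
    have hn1 : 1 ≤ c1.length := List.length_pos_iff.mpr h1
    have hn2 : 1 ≤ c2.length := List.length_pos_iff.mpr h2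
    set n1 := c1.length
    set n2 := c2.length
    set d := Nat.gcd n1 n2 with hd
    have hd1 : 1 ≤ d := Nat.gcd_pos_of_pos_left _ (by omega)
    have hdvd1 : d ∣ n1 := Nat.gcd_dvd_left _ _
    have hdvd2 : d ∣ n2 := Nat.gcd_dvd_right _ _
    set s1 := n2 / d with hs1
    set s2 := n1 / d with hs2
    have hs1pos : 1 ≤ s1 := Nat.one_le_div_iff (by omega) |>.mpr (Nat.le_of_dvd (by omega) hdvd2)
    have hs2pos : 1 ≤ s2 := Nat.one_le_div_iff (by omega) |>.mpr (Nat.le_of_dvd (by omega) hdvd1)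
    have hlcm : n1 * s1 = n2 * s2 := by
      rw [hs1, hs2, ← Nat.mul_div_assoc _ hdvd2, ← Nat.mul_div_assoc _ hdvd1, Nat.mul_comm]
    rw [fold_blocks, fold_blocks]
    simp only [List.nil_append] at *
    have hlen1 : (c1.flatMap (fun i => i :: List.replicate (s1 - 1) '0')).length = n1 * s1 :=
      len_blocks c1 s1 hs1pos
    rw [hlen1]
    refine congrArg String.ofList (Eq.trans (foldl_bits_eq_map
      (c1.flatMap (fun i => i :: List.replicate (s1 - 1) '0'))
      (c2.flatMap (fun i => i :: List.replicate (s2 - 1) '0')) (n1 * s1)) ?_)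
    apply List.map_congr_left
    intro k hk
    have hk1 : k < n1 * s1 := List.mem_range.mp hk
    have hk2 : k < n2 * s2 := by omega
    rw [getD_blocks c1 s1 hs1pos k hk1, getD_blocks c2 s2 hs2pos k hk2]
    by_cases hm1 : k % s1 = 0 <;> by_cases hm2 : k % s2 = 0 <;> simp [hm1, hm2]

theorem combiner_changed : Claim_changed_combiner := by
  unfold Claim_changed_combiner; decide

theorem combiner_tight : Claim_exact_combiner := by
  intro l1 l2 _ hpre hd
  obtain ⟨h2, h1⟩ := hd
  have hpre' : l1.toList.all (· = '1') = true := by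
    cases hpre with
    | inl h => exact absurd h2 h
    | inr h => exact h
  have hc1ne : l1.toList ≠ [] := by
    intro hc; apply h1
    have h := String.ofList_toList (s := l1)
    rw [hc] at h
    exact h.symm
  -- B returns ""
  have hlen2 : l2.toList = [] := by rw [h2]; rfl
  have hB : combiner_alt l1 l2 = "" := by
    unfold combiner_alt
    rw [if_neg hc1ne]
    simp [hlen2, Nat.zero_div]
  rw [hB]
  unfold combiner
  simp only []
  apply string_mk_ne
  intro hc
  have hlen := congrArg List.length hc
  rw [foldl_bits_length, fold_blocks] at hlen
  simp [hlen2] at hlen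
  exact h1 hlen
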